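-- pv_equiv track=rewrite | github.com/FlamesIsCool/InstantCMD | lexer.py | _split_preserving_spaces
-- ===== SOURCE A (Python) =====
-- def _split_preserving_spaces(text):
--     tokens = []
--     current = ""
--     in_space = False
--
--     for char in text:
--         is_space = char in (" ", "\t")
--
--         if char in ("|", "&", ">", "<") and not in_space:
--             if current:
--                 tokens.append(current)
--                 current = ""
--             tokens.append(char)
--             continue
--
--         if is_space != in_space:
--             if current:
--                 tokens.append(current)
--                 current = ""
--             in_space = is_space
--
--         current += char
--
--     if current:
--         tokens.append(current)
--
--     # Merge adjacent operator chars: | | -> ||, > > -> >>, & & -> &&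
--     merged = []
--     i = 0
--     while i < len(tokens):
--         if i + 1 < len(tokens) and tokens[i] in ("|", "&", ">") and tokens[i] == tokens[i + 1]:
--             merged.append(tokens[i] + tokens[i + 1])
--             i += 2
--         else:
--             merged.append(tokens[i])
--             i += 1
--
--     return merged
-- ===== SOURCE B (Python) =====
-- def _split_preserving_spaces(text):
--     # Single pass: tokens are emitted directly with inline operator merging;
--     # the in_space flag is replaced by looking at the previous character.
--     out = []
--
--     def emit(t):
--         if t in ("|", "&", ">") and out and out[-1] == t:
--             out[-1] = t + t
--         else:
--             out.append(t)
--
--     cur = ""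
--     for i, ch in enumerate(text):
--         prev_space = i > 0 and text[i - 1] in " \t"
--         if ch in "|&><" and not prev_space:
--             if cur:
--                 emit(cur)
--                 cur = ""
--             emit(ch)
--         else:
--             if cur and (ch in " \t") != (cur[-1] in " \t"):
--                 emit(cur)
--                 cur = ""
--             cur += ch
--     if cur:
--         emit(cur)
--     return out
-- ===== Notes on version B (the rewrite author's own statement) =====
-- stated objective: alternative
-- what changed: B replaces A's two-pass tokenize-then-rescan (build the token list, then a second indexed while-loop merging adjacent repeated operators) with a single pass that emits tokens directly, merging a repeated operator into the previously emitted token at emit time, and it drops A's carried in_space flag, deriving the space state from the previous character of the text.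
import Mathlib
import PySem

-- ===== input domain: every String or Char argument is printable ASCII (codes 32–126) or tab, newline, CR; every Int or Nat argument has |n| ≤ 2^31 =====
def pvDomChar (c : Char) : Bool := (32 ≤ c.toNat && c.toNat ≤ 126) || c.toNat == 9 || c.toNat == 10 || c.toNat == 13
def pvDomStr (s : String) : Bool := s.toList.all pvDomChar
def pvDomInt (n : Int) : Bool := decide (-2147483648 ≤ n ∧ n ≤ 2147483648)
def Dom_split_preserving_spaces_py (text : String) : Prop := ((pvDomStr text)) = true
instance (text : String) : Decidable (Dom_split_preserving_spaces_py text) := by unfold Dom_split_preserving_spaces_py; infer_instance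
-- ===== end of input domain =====

-- B replaces A's tokenize-then-rescan (second merge pass over the token list) with a
-- single pass that emits tokens with inline operator merging and derives the space
-- state from the previous character instead of a carried flag; objective: alternative.

-- ===== PORT A =====
-- A's shared character/token tests
def pvOp4 (c : Char) : Bool := c == '|' || c == '&' || c == '>' || c == '<'
def pvIsSp (c : Char) : Bool := c == ' ' || c == '\t'
def pvOpTok (t : String) : Bool := t == "|" || t == "&" || t == ">"

-- one iteration of A's `for char in text` loop; state = (tokens, current, in_space)
def pvStepA (st : List String × List Char × Bool) (c : Char) : List String × List Char × Bool :=
  let tokens := st.1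
  let current := st.2.1
  let in_space := st.2.2
  let is_space := pvIsSp c
  if pvOp4 c && !in_space then
    ((if current.isEmpty then tokens else tokens ++ [String.ofList current]) ++ [String.ofList [c]],
     [], in_space)
  else if is_space != in_space then
    ((if current.isEmpty then tokens else tokens ++ [String.ofList current]), [c], is_space)
  else
    (tokens, current ++ [c], in_space)

-- A's `while i < len(tokens)` merge loop, recursion on the index i
def pvMergeA (tokens : List String) (i : Nat) : List String :=
  if i < tokens.length then
    if i + 1 < tokens.length && pvOpTok (tokens.getD i "") && tokens.getD i "" == tokens.getD (i + 1) "" then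
      (tokens.getD i "" ++ tokens.getD (i + 1) "") :: pvMergeA tokens (i + 2)
    else
      tokens.getD i "" :: pvMergeA tokens (i + 1)
  else []
termination_by tokens.length - i

def split_preserving_spaces_py (text : String) : List String :=
  let st := text.toList.foldl pvStepA ([], [], false)
  let tokens := if st.2.1.isEmpty then st.1 else st.1 ++ [String.ofList st.2.1]
  pvMergeA tokens 0

-- ===== PORT B =====
-- Source B's emit: append t, merging it into the last token when it repeats an operator
def pvEmit (out : List String) (t : String) : List String :=
  if pvOpTok t && !out.isEmpty && out.getLast? == some t then
    out.dropLast ++ [t ++ t]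
  else
    out ++ [t]

-- one iteration of Source B's `for i, ch in enumerate(text)` loop; state = (out, cur)
def pvStepB (cs : List Char) (st : List String × List Char) (p : Int × Char) : List String × List Char :=
  let out := st.1
  let cur := st.2
  let i := p.1
  let ch := p.2
  let prev_space := decide (0 < i) && pvIsSp (PySem.List.pyGetD cs (i - 1) ' ')
  if pvOp4 ch && !prev_space then
    (pvEmit (if cur.isEmpty then out else pvEmit out (String.ofList cur)) (String.ofList [ch]), [])
  else if !cur.isEmpty && (pvIsSp ch != pvIsSp (cur.getLastD ' ')) then
    (pvEmit out (String.ofList cur), [ch])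
  else
    (out, cur ++ [ch])

def split_preserving_spaces_py_alt (text : String) : List String :=
  let cs := text.toList
  let st := (PySem.List.enumerate cs 0).foldl (pvStepB cs) ([], [])
  if st.2.isEmpty then st.1 else pvEmit st.1 (String.ofList st.2)

-- ===== PRECONDITION & SPEC =====
def Spec_split_preserving_spaces_py (text : String) (out : List String) : Prop := out = split_preserving_spaces_py_alt text
instance (text : String) (out : List String) : Decidable (Spec_split_preserving_spaces_py text out) := by unfold Spec_split_preserving_spaces_py; infer_instance

-- ===== CLAIM (what is proved, stated in full; the proofs are below) =====
def Claim_equal_split_preserving_spaces_py : Prop := ∀ (text : String), Dom_split_preserving_spaces_py text → Spec_split_preserving_spaces_py text (split_preserving_spaces_py text)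

-- ===== LEMMAS AND PROOFS =====

-- merge pass of A, rewritten as structural recursion on the token list
def pvMergeRec : List String → List String
  | [] => []
  | [a] => [a]
  | a :: b :: rest =>
    if pvOpTok a && a == b then (a ++ b) :: pvMergeRec rest
    else a :: pvMergeRec (b :: rest)

-- the in_space flag A carries equals the spaceness of the last processed character
def pvSpOf (pre : List Char) : Bool :=
  match pre.getLast? with
  | none => false
  | some c => pvIsSp c

lemma pvMergeA_eq_rec (tokens : List String) (i : Nat) :
    pvMergeA tokens i = pvMergeRec (tokens.drop i) := by
  refine pvMergeA.induct tokens (motive := fun j => pvMergeA tokens j = pvMergeRec (tokens.drop j)) ?_ ?_ ?_ i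
  · intro i h1 h2 ih
    have hi1 : i + 1 < tokens.length := by
      have := h2; simp only [Bool.and_eq_true, decide_eq_true_eq] at this; exact this.1.1
    have e1 : tokens.getD i "" = tokens[i] := List.getD_eq_getElem tokens "" h1
    have e2 : tokens.getD (i+1) "" = tokens[i+1] := List.getD_eq_getElem tokens "" hi1
    rw [pvMergeA, if_pos h1, if_pos h2]
    rw [List.drop_eq_getElem_cons h1, List.drop_eq_getElem_cons hi1, pvMergeRec]
    simp only [Bool.and_eq_true, decide_eq_true_eq, beq_iff_eq] at h2
    rw [if_pos (show (pvOpTok tokens[i] && tokens[i] == tokens[i+1]) = true by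
      simp only [Bool.and_eq_true, beq_iff_eq]
      exact ⟨e1 ▸ h2.1.2, by rw [← e1, ← e2]; exact h2.2⟩)]
    rw [ih, e1, e2]
  · intro i h1 h2 ih
    have e1 : tokens.getD i "" = tokens[i] := List.getD_eq_getElem tokens "" h1
    rw [pvMergeA, if_pos h1, if_neg h2, List.drop_eq_getElem_cons h1, ih, e1]
    rcases Nat.lt_or_ge (i+1) tokens.length with hi1 | hi1
    · rw [List.drop_eq_getElem_cons hi1, pvMergeRec, if_neg, ← List.drop_eq_getElem_cons hi1]
      intro hcon
      simp only [Bool.and_eq_true, beq_iff_eq] at hcon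
      apply h2
      simp only [Bool.and_eq_true, decide_eq_true_eq, beq_iff_eq]
      exact ⟨⟨hi1, by rw [List.getD_eq_getElem tokens "" h1]; exact hcon.1⟩,
             by rw [List.getD_eq_getElem tokens "" h1, List.getD_eq_getElem tokens "" hi1]; exact hcon.2⟩
    · rw [List.drop_eq_nil_of_le hi1]
      simp [pvMergeRec]
  · intro i h1
    rw [pvMergeA, if_neg h1, List.drop_eq_nil_of_le (Nat.le_of_not_lt h1)]
    simp [pvMergeRec]

lemma pvEmit_no_merge (acc : List String) (t : String)
    (h : pvOpTok t = true → acc.getLast? ≠ some t) :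
    pvEmit acc t = acc ++ [t] := by
  unfold pvEmit
  rw [if_neg]
  intro hc
  simp only [Bool.and_eq_true, beq_iff_eq] at hc
  exact h hc.1.1 hc.2

lemma pvEmit_merge (acc : List String) (t : String)
    (hop : pvOpTok t = true) (hl : acc.getLast? = some t) :
    pvEmit acc t = acc.dropLast ++ [t ++ t] := by
  unfold pvEmit
  rw [if_pos]
  simp only [Bool.and_eq_true, beq_iff_eq]
  refine ⟨⟨hop, ?_⟩, hl⟩
  cases acc with
  | nil => simp at hl
  | cons x xs => rfl

lemma pvOpTok_append (a b : String) (hop : pvOpTok a = true) (hab : a = b) :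
    pvOpTok (a ++ b) = false := by
  subst hab
  simp only [pvOpTok, Bool.or_eq_true, beq_iff_eq] at hop
  rcases hop with (h | h) | h <;> subst h <;> decide

lemma pvFoldEmit_eq_merge (ts acc : List String)
    (h : ∀ t, acc.getLast? = some t → pvOpTok t = true → ts.head? ≠ some t) :
    List.foldl pvEmit acc ts = acc ++ pvMergeRec ts := by
  induction ts using pvMergeRec.induct generalizing acc with
  | case1 => simp [pvMergeRec]
  | case2 a =>
    rw [pvMergeRec]
    simp only [List.foldl_cons, List.foldl_nil]
    exact pvEmit_no_merge acc a (fun hop heq => absurd rfl (h a heq hop))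
  | case3 a b rest hc ih =>
    simp only [Bool.and_eq_true, beq_iff_eq] at hc
    obtain ⟨hop, hab⟩ := hc
    have hopb : pvOpTok b = true := hab ▸ hop
    rw [pvMergeRec, if_pos (by subst hab; simp [hop])]
    simp only [List.foldl_cons]
    rw [pvEmit_no_merge acc a (fun hop' heq => absurd rfl (h a heq hop'))]
    rw [pvEmit_merge _ b hopb (by rw [List.getLast?_concat, hab])]
    rw [List.dropLast_concat]
    rw [show (b ++ b) = (a ++ b) by rw [hab]]
    have hside : ∀ t, (acc ++ [a ++ b]).getLast? = some t → pvOpTok t = true → rest.head? ≠ some t := by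
      intro t heq hop'
      rw [List.getLast?_concat] at heq
      cases heq
      rw [pvOpTok_append a b hop hab] at hop'
      cases hop'
    rw [ih (acc ++ [a ++ b]) hside, List.append_assoc]
    simp
  | case4 a b rest hc ih =>
    rw [pvMergeRec, if_neg hc]
    rw [List.foldl_cons]
    rw [show pvEmit acc a = acc ++ [a] from
      pvEmit_no_merge acc a (fun hop heq => absurd rfl (h a heq hop))]
    have hside : ∀ t, (acc ++ [a]).getLast? = some t → pvOpTok t = true → (b :: rest).head? ≠ some t := by
      intro t heq hop
      rw [List.getLast?_concat] at heq
      cases heq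
      intro hbt
      simp only [List.head?_cons, Option.some.injEq] at hbt
      apply hc
      simp [hop, hbt]
    rw [ih (acc ++ [a]) hside, List.append_assoc]
    simp

lemma pvSpOf_concat (pre : List Char) (c : Char) : pvSpOf (pre ++ [c]) = pvIsSp c := by
  simp [pvSpOf]

lemma pvPrevSpace (pre rest : List Char) :
    (decide (0 < (pre.length : Int)) && pvIsSp (PySem.List.pyGetD (pre ++ rest) ((pre.length : Int) - 1) ' '))
      = pvSpOf pre := by
  rcases List.eq_nil_or_concat pre with h | ⟨init, c, h⟩ <;> subst h
  · simp [pvSpOf]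
  · simp only [List.concat_eq_append]
    have hlen : ((init ++ [c]).length : Int) = (init.length : Int) + 1 := by
      simp
    rw [hlen]
    have h0 : (0 : Int) ≤ (init.length : Int) + 1 - 1 := by omega
    rw [PySem.List.pyGetD_of_nonneg _ _ h0]
    have ht : ((init.length : Int) + 1 - 1).toNat = init.length := by omega
    rw [ht, pvSpOf_concat]
    have hget : ((init ++ [c]) ++ rest).getD init.length ' ' = c := by
      rw [List.append_assoc]
      rw [List.getD_eq_getElem _ _ (by simp)]
      simp
    rw [hget]
    simp [show (0 : Int) < (init.length : Int) + 1 by omega]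

lemma pvOp_not_space (c : Char) (h : pvOp4 c = true) : pvIsSp c = false := by
  simp only [pvOp4, Bool.or_eq_true, beq_iff_eq] at h
  rcases h with ((h | h) | h) | h <;> subst h <;> decide

lemma pvPass (rest : List Char) : ∀ (pre : List Char) (ts : List String) (cur : List Char),
    (cur ≠ [] → cur.getLast? = pre.getLast?) →
    List.foldl (pvStepB (pre ++ rest)) (List.foldl pvEmit [] ts, cur)
        (PySem.List.enumerate rest (pre.length : Int))
      = ((List.foldl pvEmit [] (List.foldl pvStepA (ts, cur, pvSpOf pre) rest).1),
         (List.foldl pvStepA (ts, cur, pvSpOf pre) rest).2.1) := by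
  induction rest with
  | nil =>
    intro pre ts cur h
    simp [PySem.List.enumerate]
  | cons c rest ih =>
    intro pre ts cur hcur
    rw [PySem.List.enumerate_cons, List.foldl_cons, List.foldl_cons]
    simp only [pvStepA, pvStepB]
    rw [pvPrevSpace pre (c :: rest)]
    have happ : pre ++ c :: rest = (pre ++ [c]) ++ rest := by simp
    have hcast : ((pre.length : Int) + 1) = (((pre ++ [c]).length : Int)) := by simp
    by_cases hop : (pvOp4 c && !pvSpOf pre) = true
    · have hop' : pvOp4 c = true ∧ (!pvSpOf pre) = true := by
        simpa [Bool.and_eq_true] using hop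
      have hop4 : pvOp4 c = true := hop'.1
      have hspf : pvSpOf pre = false := by have := hop'.2; simpa using this
      rw [if_pos hop, if_pos hop]
      have hemit : pvEmit (if cur.isEmpty then List.foldl pvEmit [] ts
            else pvEmit (List.foldl pvEmit [] ts) (String.ofList cur)) (String.ofList [c])
          = List.foldl pvEmit []
              ((if cur.isEmpty then ts else ts ++ [String.ofList cur]) ++ [String.ofList [c]]) := by
        by_cases hce : cur.isEmpty <;> simp [hce, List.foldl_append]
      rw [hemit, happ, hcast,
          show pvSpOf pre = pvSpOf (pre ++ [c]) by
            rw [pvSpOf_concat, hspf, pvOp_not_space c hop4]]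
      exact ih (pre ++ [c]) _ [] (fun h => absurd rfl h)
    · rw [if_neg hop, if_neg hop]
      by_cases hce : cur = []
      · subst hce
        rw [if_neg (by simp)]
        by_cases hb : (pvIsSp c != pvSpOf pre) = true
        · rw [if_pos hb]
          rw [if_pos (by simp : ([] : List Char).isEmpty = true)]
          rw [happ, hcast, show pvIsSp c = pvSpOf (pre ++ [c]) from (pvSpOf_concat pre c).symm]
          exact ih (pre ++ [c]) ts [c] (by intro _; simp)
        · rw [if_neg hb]
          have hspc : pvIsSp c = pvSpOf pre := by simpa using hb
          rw [happ, hcast, show pvSpOf pre = pvSpOf (pre ++ [c]) by rw [pvSpOf_concat, hspc]]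
          exact ih (pre ++ [c]) ts [c] (by intro _; simp)
      · have hlast := hcur hce
        have hsome : cur.getLast?.isSome := List.getLast?_isSome.mpr hce
        obtain ⟨l, hl⟩ := Option.isSome_iff_exists.mp hsome
        have hgl : cur.getLastD ' ' = l := by
          rw [List.getLastD_eq_getLast?, hl]; rfl
        have hp : pre.getLast? = some l := by rw [← hlast]; exact hl
        have hpre : pvSpOf pre = pvIsSp l := by simp [pvSpOf, hp]
        have hcemp : cur.isEmpty = false := by simpa [List.isEmpty_iff] using hce
        have hBcond : (!cur.isEmpty && (pvIsSp c != pvIsSp (cur.getLastD ' ')))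
            = (pvIsSp c != pvSpOf pre) := by
          rw [hgl, ← hpre, hcemp]; simp
        rw [hBcond]
        by_cases hb : (pvIsSp c != pvSpOf pre) = true
        · rw [if_pos hb, if_pos hb, if_neg (by simp [hcemp])]
          rw [show pvEmit (List.foldl pvEmit [] ts) (String.ofList cur)
                = List.foldl pvEmit [] (ts ++ [String.ofList cur]) by simp [List.foldl_append]]
          rw [happ, hcast, show pvIsSp c = pvSpOf (pre ++ [c]) from (pvSpOf_concat pre c).symm]
          exact ih (pre ++ [c]) (ts ++ [String.ofList cur]) [c] (by intro _; simp)
        · rw [if_neg hb, if_neg hb]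
          have hspc : pvIsSp c = pvSpOf pre := by simpa using hb
          rw [happ, hcast, show pvSpOf pre = pvSpOf (pre ++ [c]) by rw [pvSpOf_concat, hspc]]
          exact ih (pre ++ [c]) ts (cur ++ [c]) (by intro _; simp)

-- ===== VERDICT (by name: the statement is the Claim_ definition above) =====
theorem split_preserving_spaces_py_spec : Claim_equal_split_preserving_spaces_py := by
  intro text _
  unfold Spec_split_preserving_spaces_py
  unfold split_preserving_spaces_py split_preserving_spaces_py_alt
  have hP := pvPass text.toList [] [] [] (by intro h; exact absurd rfl h)
  simp only [List.nil_append, List.length_nil, Nat.cast_zero] at hP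
  rw [show pvSpOf [] = false from rfl] at hP
  rw [show (List.foldl pvEmit [] [] : List String) = [] from rfl] at hP
  dsimp only
  rw [hP]
  set st := List.foldl pvStepA ([], [], false) text.toList with hst
  rw [pvMergeA_eq_rec, List.drop_zero]
  have hm : ∀ ts : List String, List.foldl pvEmit [] ts = pvMergeRec ts := by
    intro ts
    simpa using pvFoldEmit_eq_merge ts [] (by intro t ht; simp at ht)
  by_cases h2 : st.2.1.isEmpty
  · simp [h2, hm]
  · simp [h2, ← hm, List.foldl_append]
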